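-- pv_equiv track=rewrite | github.com/linkang-agent-dot/ADHD_agent | .cursor/skills/schedule-audit/scripts/schedule_audit.py | find_schema_pairs
-- ===== SOURCE A (Python) =====
-- def find_schema_pairs(csv_acts):
--     """自动发现 schema6/schema3-5 配对"""
--     pairs = []
--     s6_names = [n for n in csv_acts if 'schema6' in n.lower() or '_schema6' in n.lower() or '-s6' in n.lower()]
--     s35_names = [n for n in csv_acts if 'schema3' in n.lower() or 's3-5' in n.lower() or 'schema3~5' in n.lower()]
--
--     for s6 in s6_names:
--         # 尝试找配对的 s35
--         base = s6.lower().replace('schema6', '').replace('_schema6', '').replace('-s6', '').replace('-schema6', '')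
--         for s35 in s35_names:
--             s35_base = s35.lower().replace('schema3-5', '').replace('schema3~5', '').replace('_schema3-5', '').replace('-s3-5', '').replace('-schema3-5', '')
--             if base.strip('-_ ') == s35_base.strip('-_ '):
--                 pairs.append((s6, s35))
--                 break
--
--     return pairs
-- ===== SOURCE B (Python) =====
-- def find_schema_pairs(csv_acts):
--     """One pass: index s35 names by normalized base (first occurrence), collect s6 candidates, then pair by lookup."""
--     index = {}
--     s6_cands = []
--     for n in csv_acts:
--         low = n.lower()
--         if 'schema3' in low or 's3-5' in low or 'schema3~5' in low:
--             b = (low.replace('schema3-5', '').replace('schema3~5', '')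
--                     .replace('_schema3-5', '').replace('-s3-5', '')
--                     .replace('-schema3-5', '').strip('-_ '))
--             if b not in index:
--                 index[b] = n
--         if 'schema6' in low or '_schema6' in low or '-s6' in low:
--             b = (low.replace('schema6', '').replace('_schema6', '')
--                     .replace('-s6', '').replace('-schema6', '').strip('-_ '))
--             s6_cands.append((n, b))
--     return [(s6, index[b]) for s6, b in s6_cands if b in index]
-- ===== Notes on version B (the rewrite author's own statement) =====
-- stated objective: faster
-- what changed: Replaces A's three filter scans plus a nested first-match loop per s6 name with a single classifying pass that builds a base-to-first-s35-name dict and an ordered s6 candidate list, then pairs by dict lookup.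
import Mathlib
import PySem

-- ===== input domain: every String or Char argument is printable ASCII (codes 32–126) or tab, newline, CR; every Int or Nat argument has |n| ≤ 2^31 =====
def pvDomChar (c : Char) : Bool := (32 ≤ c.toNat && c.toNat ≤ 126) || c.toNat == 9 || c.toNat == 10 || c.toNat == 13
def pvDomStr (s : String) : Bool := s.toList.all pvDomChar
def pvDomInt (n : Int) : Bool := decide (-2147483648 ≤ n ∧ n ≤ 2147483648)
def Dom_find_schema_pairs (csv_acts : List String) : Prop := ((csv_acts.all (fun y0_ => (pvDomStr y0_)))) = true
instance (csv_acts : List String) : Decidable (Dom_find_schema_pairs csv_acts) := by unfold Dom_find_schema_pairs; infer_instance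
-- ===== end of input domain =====

-- B replaces A's two filter passes plus a nested match loop by one classifying pass that
-- builds a base→s35-name index (first occurrence) and an ordered s6 candidate list, then a
-- lookup pass; objective: faster (O(n) dict lookups instead of A's O(n²) inner scans).

-- shared text helpers (the literal filter tests and replace-chains both Pythons contain)
def pvS6Filt (low : String) : Bool :=
  PySem.Str.isIn "schema6" low || PySem.Str.isIn "_schema6" low || PySem.Str.isIn "-s6" low

def pvS35Filt (low : String) : Bool :=
  PySem.Str.isIn "schema3" low || PySem.Str.isIn "s3-5" low || PySem.Str.isIn "schema3~5" low

def pvS6Base (low : String) : String :=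
  PySem.Str.replace (PySem.Str.replace (PySem.Str.replace (PySem.Str.replace
    low "schema6" "") "_schema6" "") "-s6" "") "-schema6" ""

def pvS35Base (low : String) : String :=
  PySem.Str.replace (PySem.Str.replace (PySem.Str.replace (PySem.Str.replace (PySem.Str.replace
    low "schema3-5" "") "schema3~5" "") "_schema3-5" "") "-s3-5" "") "-schema3-5" ""

-- ===== PORT A =====
-- the inner 'for s35 in s35_names: … break' loop of A
def pvTryPair (pairs : List (String × String)) (s6 base : String) :
    List String → List (String × String)
  | [] => pairs
  | s35 :: rest =>
    if PySem.Str.stripChars base "-_ " ==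
       PySem.Str.stripChars (pvS35Base (PySem.Str.lower s35)) "-_ " then
      pairs ++ [(s6, s35)]
    else pvTryPair pairs s6 base rest

def find_schema_pairs (csv_acts : List String) : List (String × String) :=
  let s6_names := csv_acts.filter (fun n => pvS6Filt (PySem.Str.lower n))
  let s35_names := csv_acts.filter (fun n => pvS35Filt (PySem.Str.lower n))
  s6_names.foldl (fun pairs s6 =>
    pvTryPair pairs s6 (pvS6Base (PySem.Str.lower s6)) s35_names) []

-- ===== PORT B =====
def pvStepB (st : PySem.Dict String String × List (String × String)) (n : String) :
    PySem.Dict String String × List (String × String) :=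
  let low := PySem.Str.lower n
  let st1 :=
    if pvS35Filt low then
      let b := PySem.Str.stripChars (pvS35Base low) "-_ "
      if st.1.contains b then st else (st.1.insert b n, st.2)
    else st
  if pvS6Filt low then
    (st1.1, st1.2 ++ [(n, PySem.Str.stripChars (pvS6Base low) "-_ ")])
  else st1

def find_schema_pairs_alt (csv_acts : List String) : List (String × String) :=
  let st := csv_acts.foldl pvStepB (PySem.Dict.empty, [])
  st.2.filterMap (fun p => (st.1.get? p.2).map (fun m => (p.1, m)))

-- ===== PRECONDITION & SPEC =====
def Spec_find_schema_pairs (csv_acts : List String) (out : List (String × String)) : Prop := out = find_schema_pairs_alt csv_acts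
instance (csv_acts : List String) (out : List (String × String)) : Decidable (Spec_find_schema_pairs csv_acts out) := by unfold Spec_find_schema_pairs; infer_instance

-- ===== CLAIM (what is proved, stated in full; the proofs are below) =====
def Claim_equal_find_schema_pairs : Prop := ∀ (csv_acts : List String), Dom_find_schema_pairs csv_acts → Spec_find_schema_pairs csv_acts (find_schema_pairs csv_acts)

-- ===== LEMMAS AND PROOFS =====

-- proof-side abbreviations
def pvKey35 (n : String) : String := PySem.Str.stripChars (pvS35Base (PySem.Str.lower n)) "-_ "
def pvKey6 (n : String) : String := PySem.Str.stripChars (pvS6Base (PySem.Str.lower n)) "-_ "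
def pvIns (d : PySem.Dict String String) (n : String) : PySem.Dict String String :=
  if d.contains (pvKey35 n) then d else d.insert (pvKey35 n) n

-- B's single pass splits into the dict pass over the s35-filtered names and the candidate
-- list over the s6-filtered names
theorem pvFoldB_split (cs : List String) (d : PySem.Dict String String)
    (acc : List (String × String)) :
    cs.foldl pvStepB (d, acc) =
      ((cs.filter (fun n => pvS35Filt (PySem.Str.lower n))).foldl pvIns d,
       acc ++ (cs.filter (fun n => pvS6Filt (PySem.Str.lower n))).map
         (fun n => (n, pvKey6 n))) := by
  induction cs generalizing d acc with
  | nil => simp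
  | cons n rest ih =>
    simp only [List.foldl_cons, List.filter_cons]
    by_cases h35 : pvS35Filt (PySem.Str.lower n) <;>
      by_cases h6 : pvS6Filt (PySem.Str.lower n) <;>
        (simp [pvStepB, pvIns, pvKey35, pvKey6, h35, h6, ih]; try (split <;> simp))

-- looking a key up in the first-occurrence index is finding the first name with that key
theorem pvGet_foldIns (l : List String) (d : PySem.Dict String String) (k : String) :
    ((l.foldl pvIns d).get? k) =
      match d.get? k with
      | some v => some v
      | none => l.find? (fun n => pvKey35 n == k) := by
  induction l generalizing d with
  | nil => cases h : d.get? k <;> simp [h]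
  | cons n rest ih =>
    simp only [List.foldl_cons, ih, List.find?_cons]
    by_cases hk : pvKey35 n = k
    · subst hk
      rw [pvIns, PySem.Dict.contains_eq_isSome_get?]
      cases hdv : d.get? (pvKey35 n) with
      | some v => simp [hdv]
      | none => simp [PySem.Dict.get?_insert_self]
    · have : (pvKey35 n == k) = false := by simp [hk]
      rw [pvIns]
      cases hc : d.contains (pvKey35 n) with
      | true => simp [this]
      | false => simp [this, PySem.Dict.get?_insert_of_ne d n (Ne.symm hk)]

-- A's inner loop returns the first matching s35 name, appended as a pair
theorem pvTryPair_eq (pairs : List (String × String)) (s6 base : String) (l : List String) :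
    pvTryPair pairs s6 base l =
      pairs ++ (match l.find? (fun s35 =>
          PySem.Str.stripChars base "-_ " ==
          PySem.Str.stripChars (pvS35Base (PySem.Str.lower s35)) "-_ ") with
        | some m => [(s6, m)]
        | none => []) := by
  induction l generalizing pairs with
  | nil => simp [pvTryPair]
  | cons s35 rest ih =>
    rw [pvTryPair, List.find?_cons]
    by_cases h : PySem.Str.stripChars base "-_ " =
        PySem.Str.stripChars (pvS35Base (PySem.Str.lower s35)) "-_ "
    · simp [h]
    · have hb : (PySem.Str.stripChars base "-_ " ==
          PySem.Str.stripChars (pvS35Base (PySem.Str.lower s35)) "-_ ") = false := by simp [h]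
      simp [hb, ih]

-- A's outer loop equals B's lookup pass over the s6 names, given the final dict's lookups
theorem pvOuter_eq (s6l s35l : List String) (D : PySem.Dict String String)
    (hD : ∀ k, D.get? k = s35l.find? (fun n => pvKey35 n == k))
    (acc : List (String × String)) :
    s6l.foldl (fun pairs s6 => pvTryPair pairs s6 (pvS6Base (PySem.Str.lower s6)) s35l) acc =
      acc ++ s6l.filterMap (fun s6 => (D.get? (pvKey6 s6)).map (fun m => (s6, m))) := by
  induction s6l generalizing acc with
  | nil => simp
  | cons s6 rest ih =>
    simp only [List.foldl_cons, List.filterMap_cons]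
    rw [pvTryPair_eq, hD, ih]
    have hpred : (fun n => pvKey35 n == pvKey6 s6) =
        (fun s35 => PySem.Str.stripChars (pvS6Base (PySem.Str.lower s6)) "-_ " ==
          PySem.Str.stripChars (pvS35Base (PySem.Str.lower s35)) "-_ ") := by
      funext n; rw [pvKey35, pvKey6, Bool.beq_comm]
    rw [hpred]
    cases s35l.find? (fun s35 => PySem.Str.stripChars (pvS6Base (PySem.Str.lower s6)) "-_ " ==
        PySem.Str.stripChars (pvS35Base (PySem.Str.lower s35)) "-_ ") with
    | some m => simp
    | none => simp

-- ===== VERDICT (by name: the statement is the Claim_ definition above) =====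
theorem find_schema_pairs_spec : Claim_equal_find_schema_pairs := by
  intro cs _
  unfold Spec_find_schema_pairs find_schema_pairs find_schema_pairs_alt
  rw [pvFoldB_split]
  have hD : ∀ k, (List.foldl pvIns PySem.Dict.empty
      (List.filter (fun n => pvS35Filt (PySem.Str.lower n)) cs)).get? k =
      (List.filter (fun n => pvS35Filt (PySem.Str.lower n)) cs).find?
        (fun n => pvKey35 n == k) := by
    intro k; rw [pvGet_foldIns]; simp
  rw [pvOuter_eq _ _ _ hD []]
  simp [List.filterMap_map, Function.comp]
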